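-- pv_equiv track=rewrite | github.com/ckodser/ckodser.github.io | scripts/ensure_double_dollar_math.py | _split_inline_code
-- ===== SOURCE A (Python) =====
-- def _split_inline_code(line: str) -> list[tuple[bool, str]]:
--     """
--     Split a line into [(is_code, text)] parts based on backticks.
--     This is a simple, practical splitter for Markdown inline code.
--     """
--     parts: list[tuple[bool, str]] = []
--     buf: list[str] = []
--     in_code = False
--     i = 0
--     while i < len(line):
--         ch = line[i]
--         if ch == "`":
--             # Flush current buffer.
--             if buf:
--                 parts.append((in_code, "".join(buf)))
--                 buf = []
--
--             # Consume a run of backticks.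
--             j = i
--             while j < len(line) and line[j] == "`":
--                 j += 1
--
--             # Keep the delimiter itself as part of the output (code or non-code).
--             parts.append((False, line[i:j]))
--             in_code = not in_code
--             i = j
--             continue
--
--         buf.append(ch)
--         i += 1
--
--     if buf:
--         parts.append((in_code, "".join(buf)))
--     return parts
-- ===== SOURCE B (Python) =====
-- def _split_inline_code(line: str) -> list[tuple[bool, str]]:
--     """Tokenize the line into maximal runs (backticks vs non-backticks), then
--     classify tokens in a second pass, flipping in_code at each backtick run."""
--     tokens: list[str] = []
--     cur = ""
--     for ch in line:
--         if cur and (cur[0] == "`") == (ch == "`"):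
--             cur += ch
--         else:
--             if cur:
--                 tokens.append(cur)
--             cur = ch
--     if cur:
--         tokens.append(cur)
--
--     parts: list[tuple[bool, str]] = []
--     in_code = False
--     for tok in tokens:
--         if tok[0] == "`":
--             parts.append((False, tok))
--             in_code = not in_code
--         else:
--             parts.append((in_code, tok))
--     return parts
-- ===== Notes on version B (the rewrite author's own statement) =====
-- stated objective: alternative
-- what changed: Replaced A's single index-driven character scan (with an inner loop consuming backtick runs and a text buffer flushed at delimiters) by a two-pass tokenize-then-classify structure: first group the line into maximal runs of backticks/non-backticks, then classify the tokens while flipping the in_code flag.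
import Mathlib
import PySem

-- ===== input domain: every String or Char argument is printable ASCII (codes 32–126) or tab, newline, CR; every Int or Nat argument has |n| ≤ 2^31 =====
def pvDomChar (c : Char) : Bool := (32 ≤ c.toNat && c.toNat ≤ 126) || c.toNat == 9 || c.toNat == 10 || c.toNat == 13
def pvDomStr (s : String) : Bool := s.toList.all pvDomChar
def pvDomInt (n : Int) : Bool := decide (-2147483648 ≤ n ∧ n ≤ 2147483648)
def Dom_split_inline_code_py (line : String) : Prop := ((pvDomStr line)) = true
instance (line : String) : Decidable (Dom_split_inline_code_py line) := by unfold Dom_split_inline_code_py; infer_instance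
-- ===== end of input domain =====

-- B replaces A's single character scan (with an inner backtick-run loop) by a
-- tokenize-then-classify two-pass structure; objective: alternative decomposition.

-- ===== PORT A =====
-- A's while loop over indices: state (parts, buf, in_code); the inner
-- 'consume a run of backticks' loop is takeWhile/dropWhile on the remaining list.
def pyA_go (l : List Char) (buf : List Char) (in_code : Bool)
    (parts : List (Bool × String)) : List (Bool × String) :=
  match l with
  | [] => if buf = [] then parts else parts ++ [(in_code, String.mk buf)]
  | c :: rest =>
    if c = '`' then
      let parts' := if buf = [] then parts else parts ++ [(in_code, String.mk buf)]
      pyA_go ((c :: rest).dropWhile (· = '`')) [] (!in_code)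
        (parts' ++ [(false, String.mk ((c :: rest).takeWhile (· = '`')))])
    else
      pyA_go rest (buf ++ [c]) in_code parts
termination_by l.length
decreasing_by
  · have := List.length_dropWhile_le (· = '`') rest
    simp_all [List.dropWhile_cons]
  · simp

def split_inline_code_py (line : String) : List (Bool × String) :=
  pyA_go line.toList [] false []

-- ===== PORT B =====
-- pass 1 of Source B: group the characters into maximal runs (cur grows while the
-- class of ch matches the class of cur's first char).
def tokB (l : List Char) (tokens : List (List Char)) (cur : List Char) : List (List Char) :=
  match l with
  | [] => if cur = [] then tokens else tokens ++ [cur]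
  | ch :: rest =>
    if cur ≠ [] ∧ ((cur.head? = some '`') = (ch = '`')) then
      tokB rest tokens (cur ++ [ch])
    else
      tokB rest (if cur = [] then tokens else tokens ++ [cur]) [ch]

-- pass 2 of Source B: classify each token, flipping in_code at backtick runs.
def classB (ts : List (List Char)) (in_code : Bool)
    (parts : List (Bool × String)) : List (Bool × String) :=
  match ts with
  | [] => parts
  | t :: rest =>
    if t.head? = some '`' then classB rest (!in_code) (parts ++ [(false, String.mk t)])
    else classB rest in_code (parts ++ [(in_code, String.mk t)])

def split_inline_code_py_alt (line : String) : List (Bool × String) :=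
  classB (tokB line.toList [] []) false []

-- ===== PRECONDITION & SPEC =====
def Spec_split_inline_code_py (line : String) (out : List (Bool × String)) : Prop := out = split_inline_code_py_alt line
instance (line : String) (out : List (Bool × String)) : Decidable (Spec_split_inline_code_py line out) := by unfold Spec_split_inline_code_py; infer_instance

-- ===== CLAIM (what is proved, stated in full; the proofs are below) =====
def Claim_equal_split_inline_code_py : Prop := ∀ (line : String), Dom_split_inline_code_py line → Spec_split_inline_code_py line (split_inline_code_py line)

-- ===== LEMMAS AND PROOFS =====

theorem pyA_go_append : ∀ (n : Nat) (l : List Char), l.length ≤ n →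
    ∀ buf ic parts q, pyA_go l buf ic (parts ++ q) = parts ++ pyA_go l buf ic q := by
  intro n
  induction n with
  | zero =>
    intro l hl buf ic parts q
    have : l = [] := List.eq_nil_of_length_eq_zero (Nat.le_zero.mp hl)
    subst this
    simp only [pyA_go]
    split <;> simp
  | succ n ih =>
    intro l hl buf ic parts q
    match l with
    | [] => simp only [pyA_go]; split <;> simp
    | c :: rest =>
      by_cases hc : c = '`'
      · subst hc
        have hlen : (('`' :: rest).dropWhile (· = '`')).length ≤ n := by
          have h2 : (('`' :: rest).dropWhile (· = '`')) = rest.dropWhile (· = '`') := by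
            simp [List.dropWhile_cons]
          rw [h2]
          have := List.length_dropWhile_le (· = '`') rest
          simp at hl; omega
        simp only [pyA_go, if_true, eq_self_iff_true, if_pos rfl]
        have e : (if buf = [] then parts ++ q else (parts ++ q) ++ [(ic, String.mk buf)]) ++
              [(false, String.mk (('`' :: rest).takeWhile (· = '`')))]
            = parts ++ ((if buf = [] then q else q ++ [(ic, String.mk buf)]) ++
              [(false, String.mk (('`' :: rest).takeWhile (· = '`')))]) := by
          split <;> simp
        rw [e, ih _ hlen]
      · have hlen : rest.length ≤ n := by simp at hl; omega
        simp only [pyA_go, if_neg hc]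
        exact ih rest hlen _ _ _ _

theorem pyA_go_app (l buf : List Char) (ic : Bool) (parts : List (Bool × String)) :
    pyA_go l buf ic parts = parts ++ pyA_go l buf ic [] := by
  have h := pyA_go_append l.length l le_rfl buf ic parts []
  simpa using h

theorem pyA_step_tick (rest buf : List Char) (ic : Bool) :
    pyA_go ('`' :: rest) buf ic [] =
      (if buf = [] then [] else [(ic, String.mk buf)]) ++
        (false, String.mk ('`' :: rest.takeWhile (· = '`'))) ::
          pyA_go (rest.dropWhile (· = '`')) [] (!ic) [] := by
  simp only [pyA_go, if_true, eq_self_iff_true, if_pos rfl]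
  rw [pyA_go_app]
  split <;> simp [List.takeWhile_cons, List.dropWhile_cons]

theorem pyA_step_char (c : Char) (rest buf : List Char) (ic : Bool) (hc : c ≠ '`') :
    pyA_go (c :: rest) buf ic [] = pyA_go rest (buf ++ [c]) ic [] := by
  simp only [pyA_go, if_neg hc]

-- accumulator elimination for B's tokens list
theorem tokB_append (l : List Char) : ∀ tokens cur,
    tokB l tokens cur = tokens ++ tokB l [] cur := by
  induction l with
  | nil => intro tokens cur; simp only [tokB]; split <;> simp
  | cons ch rest ih =>
    intro tokens cur
    simp only [tokB]
    split
    · exact ih _ _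
    · rw [ih (if cur = [] then tokens else tokens ++ [cur]),
        ih (if cur = [] then ([] : List (List Char)) else [] ++ [cur])]
      split <;> simp

-- accumulator elimination for B's parts list
theorem classB_append (ts : List (List Char)) : ∀ ic parts,
    classB ts ic parts = parts ++ classB ts ic [] := by
  induction ts with
  | nil => intro ic parts; simp [classB]
  | cons t rest ih =>
    intro ic parts
    simp only [classB]
    split
    · rw [ih (!ic) (parts ++ [(false, String.mk t)]), ih (!ic) ([] ++ [(false, String.mk t)])]
      simp
    · rw [ih ic (parts ++ [(ic, String.mk t)]), ih ic ([] ++ [(ic, String.mk t)])]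
      simp

-- one step of B's classification pass
theorem classB_cons (t : List Char) (ts : List (List Char)) (ic : Bool) :
    classB (t :: ts) ic [] =
      (if t.head? = some '`' then (false, String.mk t) else (ic, String.mk t)) ::
        classB ts (if t.head? = some '`' then !ic else ic) [] := by
  simp only [classB]
  split <;> rename_i h <;> rw [classB_append] <;> simp [h]

-- the core correspondence: B's tokenize-then-classify started from buffer state
-- cur equals A's scan started from the matching buffer state
theorem mainCorr (l : List Char) : ∀ ic : Bool,
    (classB (tokB l [] []) ic [] = pyA_go l [] ic []) ∧
    (∀ t, t ≠ [] → t.head? ≠ some '`' →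
      classB (tokB l [] t) ic [] = pyA_go l t ic []) ∧
    (∀ r, r ≠ [] → r.head? = some '`' →
      classB (tokB l [] r) ic [] =
        (false, String.mk (r ++ l.takeWhile (· = '`'))) ::
          pyA_go (l.dropWhile (· = '`')) [] (!ic) []) := by
  induction l with
  | nil =>
    intro ic
    refine ⟨?_, ?_, ?_⟩
    · simp [tokB, classB, pyA_go]
    · intro t ht hh
      simp only [tokB, if_neg ht, List.nil_append]
      rw [classB_cons, if_neg hh, if_neg hh]
      simp [classB, pyA_go, ht]
    · intro r hr hh
      simp only [tokB]
      rw [show (if r = [] then ([] : List (List Char)) else [] ++ [r]) = [r] from by simp [hr]]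
      rw [classB_cons, if_pos hh, if_pos hh]
      simp [classB, pyA_go]
  | cons c rest ih =>
    intro ic
    by_cases hc : c = '`'
    · subst hc
      refine ⟨?_, ?_, ?_⟩
      · have h1 : tokB ('`' :: rest) [] [] = tokB rest [] ['`'] := by simp [tokB]
        rw [h1, ((ih ic).2.2) ['`'] (by simp) (by simp), pyA_step_tick]
        simp
      · intro t ht hh
        have h1 : tokB ('`' :: rest) [] t = tokB rest [t] ['`'] := by
          simp [tokB, ht, hh]
        rw [h1, tokB_append rest [t] ['`'], List.singleton_append,
          classB_cons, if_neg hh, if_neg hh,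
          ((ih ic).2.2) ['`'] (by simp) (by simp), pyA_step_tick, if_neg ht]
        simp
      · intro r hr hh
        have h1 : tokB ('`' :: rest) [] r = tokB rest [] (r ++ ['`']) := by
          simp [tokB, hr, hh]
        have hh' : (r ++ ['`']).head? = some '`' := by
          cases r with
          | nil => exact absurd rfl hr
          | cons a as => simpa using hh
        rw [h1, ((ih ic).2.2) (r ++ ['`']) (by simp) hh']
        simp [List.takeWhile_cons, List.dropWhile_cons]
    · refine ⟨?_, ?_, ?_⟩
      · have h1 : tokB (c :: rest) [] [] = tokB rest [] [c] := by simp [tokB]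
        rw [h1, ((ih ic).2.1) [c] (by simp) (by simp [hc]), pyA_step_char c rest [] ic hc]
        simp
      · intro t ht hh
        have h1 : tokB (c :: rest) [] t = tokB rest [] (t ++ [c]) := by
          simp [tokB, ht, hh, hc]
        have hh' : (t ++ [c]).head? ≠ some '`' := by
          cases t with
          | nil => exact absurd rfl ht
          | cons a as => simpa using hh
        rw [h1, ((ih ic).2.1) (t ++ [c]) (by simp) hh', pyA_step_char c rest t ic hc]
      · intro r hr hh
        have h1 : tokB (c :: rest) [] r = tokB rest [r] [c] := by
          simp [tokB, hr, hh, hc]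
        have h2 : (c :: rest).dropWhile (· = '`') = c :: rest := by
          simp [List.dropWhile_cons, hc]
        have h3 : (c :: rest).takeWhile (· = '`') = [] := by
          simp [List.takeWhile_cons, hc]
        rw [h1, tokB_append rest [r] [c], List.singleton_append,
          classB_cons, if_pos hh, if_pos hh,
          ((ih (!ic)).2.1) [c] (by simp) (by simp [hc]), h2, h3,
          pyA_step_char c rest [] (!ic) hc]
        simp

-- ===== VERDICT (by name: the statement is the Claim_ definition above) =====
theorem split_inline_code_py_spec : Claim_equal_split_inline_code_py := by
  intro line _
  unfold Spec_split_inline_code_py split_inline_code_py split_inline_code_py_alt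
  exact ((mainCorr line.toList false).1).symm
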